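-- pv_equiv track=rewrite | github.com/tucazorron/live-coding-interview | questions/number-good-ways-split-string.py | solution
-- ===== SOURCE A (Python) =====
-- def solution(s):
--     lenstr = len(s)
--     if lenstr == 1:
--         return 0
--     if lenstr == 2:
--         return 1
--
--     first, last = {}, {}
--
--     for index, char in enumerate(s):
--         if char not in first:
--             first[char] = index
--         last[char] = index
--
--     indices = list(first.values()) + list(last.values())
--     indices.sort()
--
--     mid = len(indices) // 2
--
--     return indices[mid] - indices[mid-1]
-- ===== SOURCE B (Python) =====
-- def solution(s):
--     n = len(s)
--     if n == 1:
--         return 0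
--     if n == 2:
--         return 1
--
--     first, last = {}, {}
--
--     for index, char in enumerate(s):
--         if char not in first:
--             first[char] = index
--         last[char] = index
--
--     # counting array over positions instead of building and sorting a list:
--     # cnt[i] is the multiplicity of index i among the first/last occurrence indices
--     cnt = [0] * n
--     for i in first.values():
--         cnt[i] += 1
--     for i in last.values():
--         cnt[i] += 1
--
--     k = len(first)
--     lo = hi = None
--     total = 0
--     for i in range(n):
--         total += cnt[i]
--         if lo is None and total >= k:
--             lo = i
--         if hi is None and total >= k + 1:
--             hi = i
--     return hi - lo
-- ===== Notes on version B (the rewrite author's own statement) =====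
-- stated objective: alternative
-- what changed: Instead of concatenating the first/last occurrence indices into a list, sorting it and subtracting the two middle entries, B builds a counting array over positions (each position gets +1 for being a first occurrence and +1 for a last occurrence) and finds the two middle order statistics by a single prefix-sum threshold scan, so no sort is performed.
import Mathlib
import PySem

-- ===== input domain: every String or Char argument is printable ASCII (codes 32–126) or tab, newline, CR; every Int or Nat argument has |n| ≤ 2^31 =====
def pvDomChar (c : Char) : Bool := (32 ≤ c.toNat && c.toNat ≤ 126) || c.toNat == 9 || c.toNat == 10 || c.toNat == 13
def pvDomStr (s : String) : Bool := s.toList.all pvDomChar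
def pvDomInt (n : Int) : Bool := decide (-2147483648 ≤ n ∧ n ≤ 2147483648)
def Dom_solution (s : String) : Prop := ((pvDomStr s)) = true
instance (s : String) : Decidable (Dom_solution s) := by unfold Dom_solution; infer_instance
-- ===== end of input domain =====

-- B replaces A's "concatenate first/last occurrence indices, sort, subtract the two middle
-- entries" by a counting array over positions plus a prefix-sum threshold scan (no sort).


-- ===== PORT A =====
-- the first/last-occurrence dictionary loop (shared line by line by both Pythons)
def dictStep (fl : PySem.Dict Char Int × PySem.Dict Char Int) (ic : Int × Char) :
    PySem.Dict Char Int × PySem.Dict Char Int :=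
  ((if fl.1.contains ic.2 then fl.1 else fl.1.insert ic.2 ic.1),
   fl.2.insert ic.2 ic.1)

def solution (s : String) : Int :=
  let lenstr : Int := PySem.Str.len s
  if lenstr = 1 then 0
  else if lenstr = 2 then 1
  else
    let fl := (PySem.List.enumerate s.toList 0).foldl dictStep
      (PySem.Dict.empty, PySem.Dict.empty)
    let indices := PySem.List.sorted (fl.1.values ++ fl.2.values) (fun x => x) false
    let mid := PySem.Int.floordiv ((indices.length : Nat) : Int) 2
    match PySem.List.pyGet? indices mid, PySem.List.pyGet? indices (mid - 1) with
    | some a, some b => a - b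
    | _, _ => 0   -- unreachable: Python raises IndexError here (excluded by Pre_)

-- ===== PORT B =====
-- B's own copy of the first/last-occurrence dictionary loop (same lines in Source B)
def dictStepB (fl : PySem.Dict Char Int × PySem.Dict Char Int) (ic : Int × Char) :
    PySem.Dict Char Int × PySem.Dict Char Int :=
  ((if fl.1.contains ic.2 then fl.1 else fl.1.insert ic.2 ic.1),
   fl.2.insert ic.2 ic.1)

-- cnt[i] += 1
def bumpAt (c : List Int) (i : Int) : List Int :=
  PySem.List.pySetD c i (PySem.List.pyGetD c i 0 + 1)

-- one step of the prefix-sum threshold scan; state = (total, lo, hi)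
def scanStep (k : Int) (cnt : List Int) (st : Int × Option Int × Option Int) (i : Int) :
    Int × Option Int × Option Int :=
  let total := st.1 + PySem.List.pyGetD cnt i 0
  ⟨total,
   (if st.2.1 = none ∧ k ≤ total then some i else st.2.1),
   (if st.2.2 = none ∧ k + 1 ≤ total then some i else st.2.2)⟩

def solution_alt (s : String) : Int :=
  let n : Int := PySem.Str.len s
  if n = 1 then 0
  else if n = 2 then 1
  else
    let fl := (PySem.List.enumerate s.toList 0).foldl dictStepB
      (PySem.Dict.empty, PySem.Dict.empty)
    let cnt1 := fl.1.values.foldl bumpAt (List.replicate n.toNat 0)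
    let cnt := fl.2.values.foldl bumpAt cnt1
    let k : Int := (fl.1.size : Int)
    let st := (PySem.List.pyRange 0 n 1).foldl (scanStep k cnt) (0, none, none)
    match st.2.2 with
    | some hi =>
      match st.2.1 with
      | some lo => hi - lo
      | none => 0   -- unreachable: Python raises TypeError here (excluded by Pre_)
    | none => 0     -- unreachable: Python raises TypeError here (excluded by Pre_)

-- ===== PRECONDITION & SPEC =====
-- Pre_ excludes only the empty string, on which A raises IndexError (and B raises TypeError).
def Pre_solution (s : String) : Prop := s ≠ ""
instance (s : String) : Decidable (Pre_solution s) := by unfold Pre_solution; infer_instance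
def pvWitness_solution : String := "aab"
def Spec_solution (s : String) (out : Int) : Prop := out = solution_alt s
instance (s : String) (out : Int) : Decidable (Spec_solution s out) := by unfold Spec_solution; infer_instance

-- ===== CLAIM (what is proved, stated in full; the proofs are below) =====
def Claim_equal_solution : Prop := ∀ (s : String), Dom_solution s → Pre_solution s → Spec_solution s (solution s)

-- ===== LEMMAS AND PROOFS =====

theorem countP_lt_succ (T : List Int) (b : Int) :
    T.countP (fun x => decide (x < b + 1)) = T.countP (fun x => decide (x < b)) + T.count b := by
  induction T with
  | nil => simp
  | cons a t ih =>
    simp only [List.countP_cons, List.count_cons, ih, beq_iff_eq]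
    by_cases h1 : a < b + 1 <;> by_cases h2 : a < b <;> by_cases h3 : a = b <;>
      simp [h1, h2, h3] <;> omega

-- order-statistic characterisation on a sorted list: rank r sits strictly below i
-- iff more than r elements are strictly below i
theorem select_iff (T : List Int) (hs : T.Pairwise (· ≤ ·)) (r : Nat) (hr : r < T.length) (i : Int) :
    r < T.countP (fun x => decide (x < i)) ↔ T[r] < i := by
  rw [List.pairwise_iff_getElem] at hs
  constructor
  · intro h
    by_contra hge
    rw [not_lt] at hge
    have hdrop : (T.drop r).countP (fun x => decide (x < i)) = 0 := by
      rw [List.countP_eq_zero]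
      intro a ha
      obtain ⟨m, hm, rfl⟩ := List.mem_iff_getElem.mp ha
      rw [List.getElem_drop]
      simp only [decide_eq_true_eq, not_lt]
      refine le_trans hge ?_
      rcases Nat.eq_zero_or_pos m with h0 | h0
      · subst h0; simp
      · exact hs r (r + m) (by omega) (by simp at hm; omega) (by omega)
    have hsplit : T.countP (fun x => decide (x < i)) =
        (T.take r).countP (fun x => decide (x < i)) + (T.drop r).countP (fun x => decide (x < i)) := by
      conv_lhs => rw [← List.take_append_drop r T]
      rw [List.countP_append]
    have hle : (T.take r).countP (fun x => decide (x < i)) ≤ r := by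
      calc (T.take r).countP _ ≤ (T.take r).length := List.countP_le_length
        _ ≤ r := by simp
    omega
  · intro h
    have hsplit : T.countP (fun x => decide (x < i)) =
        (T.take (r+1)).countP (fun x => decide (x < i)) + (T.drop (r+1)).countP (fun x => decide (x < i)) := by
      conv_lhs => rw [← List.take_append_drop (r+1) T]
      rw [List.countP_append]
    have hlen : (T.take (r+1)).length = r + 1 := by rw [List.length_take]; omega
    have htake : (T.take (r+1)).countP (fun x => decide (x < i)) = (T.take (r+1)).length := by
      rw [List.countP_eq_length]
      intro a ha
      obtain ⟨m, hm, rfl⟩ := List.mem_iff_getElem.mp ha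
      rw [List.getElem_take]
      simp only [decide_eq_true_eq]
      rcases Nat.lt_or_ge m r with hmr | hmr
      · exact lt_of_le_of_lt (hs m r (by omega) (by omega) hmr) h
      · have hmr' : m = r := by omega
        subst hmr'; exact h
    omega

-- invariants of the shared dictionary-building loop
theorem dict_fold_inv (l : List (Int × Char)) :
    ∀ (d1 d2 : PySem.Dict Char Int), d1.keys = d2.keys →
    ((l.foldl dictStep (d1, d2)).1.keys = (l.foldl dictStep (d1, d2)).2.keys) ∧
    (∀ v ∈ (l.foldl dictStep (d1, d2)).1.values, v ∈ d1.values ∨ v ∈ l.map (·.1)) ∧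
    (∀ v ∈ (l.foldl dictStep (d1, d2)).2.values, v ∈ d2.values ∨ v ∈ l.map (·.1)) ∧
    (∀ ch, ch ∈ (l.foldl dictStep (d1, d2)).1.keys ↔ ch ∈ d1.keys ∨ ch ∈ l.map (·.2)) := by
  induction l with
  | nil => intro d1 d2 hk; simp [hk]
  | cons p t ih =>
    intro d1 d2 hk
    simp only [List.foldl_cons]
    have hstep : dictStep (d1, d2) p =
        ((if d1.contains p.2 then d1 else d1.insert p.2 p.1), d2.insert p.2 p.1) := rfl
    rw [hstep]
    by_cases hc : d1.contains p.2
    · have hkeys2 : (d2.insert p.2 p.1).keys = d2.keys := by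
        apply PySem.Dict.keys_insert_of_contains
        rw [PySem.Dict.contains_iff_mem_keys] at hc ⊢
        rwa [← hk]
      have hkeys : d1.keys = (d2.insert p.2 p.1).keys := by rw [hkeys2, hk]
      obtain ⟨h1, h2, h3, h4⟩ := ih d1 (d2.insert p.2 p.1) hkeys
      simp only [hc, if_true]
      refine ⟨h1, ?_, ?_, ?_⟩
      · intro v hv
        rcases h2 v hv with h | h
        · exact Or.inl h
        · exact Or.inr (by simp; right; exact (by simpa using h))
      · intro v hv
        rcases h3 v hv with h | h
        · rcases PySem.Dict.mem_values_insert _ _ _ _ h with h' | h'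
          · exact Or.inr (by simp [h'])
          · exact Or.inl h'
        · exact Or.inr (by simp; right; exact (by simpa using h))
      · intro ch
        rw [h4 ch]
        constructor
        · rintro (h | h)
          · exact Or.inl h
          · exact Or.inr (by simp; right; exact (by simpa using h))
        · rintro (h | h)
          · exact Or.inl h
          · simp at h
            rcases h with h | h
            · left; rw [h, ← PySem.Dict.contains_iff_mem_keys]; exact hc
            · exact Or.inr (by simpa using h)
    · have hnc2 : d2.contains p.2 = false := by
        rw [Bool.eq_false_iff]
        intro h
        rw [PySem.Dict.contains_iff_mem_keys] at h
        rw [← hk, ← PySem.Dict.contains_iff_mem_keys] at h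
        simp [h] at hc
      have hkeys1 : (d1.insert p.2 p.1).keys = d1.keys ++ [p.2] :=
        PySem.Dict.keys_insert_of_not_contains _ _ (by simpa using hc)
      have hkeys2 : (d2.insert p.2 p.1).keys = d2.keys ++ [p.2] :=
        PySem.Dict.keys_insert_of_not_contains _ _ hnc2
      have hkeys : (d1.insert p.2 p.1).keys = (d2.insert p.2 p.1).keys := by
        rw [hkeys1, hkeys2, hk]
      obtain ⟨h1, h2, h3, h4⟩ := ih (d1.insert p.2 p.1) (d2.insert p.2 p.1) hkeys
      rw [if_neg hc]
      refine ⟨h1, ?_, ?_, ?_⟩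
      · intro v hv
        rcases h2 v hv with h | h
        · rcases PySem.Dict.mem_values_insert _ _ _ _ h with h' | h'
          · exact Or.inr (by simp [h'])
          · exact Or.inl h'
        · exact Or.inr (by simp; right; exact (by simpa using h))
      · intro v hv
        rcases h3 v hv with h | h
        · rcases PySem.Dict.mem_values_insert _ _ _ _ h with h' | h'
          · exact Or.inr (by simp [h'])
          · exact Or.inl h'
        · exact Or.inr (by simp; right; exact (by simpa using h))
      · intro ch
        rw [h4 ch, hkeys1]
        constructor
        · rintro (h | h)
          · simp at h
            rcases h with h | h
            · exact Or.inl h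
            · exact Or.inr (by simp [h])
          · exact Or.inr (by simp; right; exact (by simpa using h))
        · rintro (h | h)
          · exact Or.inl (by simp [h])
          · simp at h
            rcases h with h | h
            · exact Or.inl (by simp [h])
            · exact Or.inr (by simpa using h)

-- the counting loop: entry j ends up incremented once per occurrence of j in vs
theorem bump_fold (vs : List Int) : ∀ (c : List Int),
    (∀ v ∈ vs, 0 ≤ v ∧ v < (c.length : Int)) →
    (vs.foldl bumpAt c).length = c.length ∧
    (∀ j : Nat, (vs.foldl bumpAt c).getD j 0 = c.getD j 0 + (vs.count ((j : Nat) : Int) : Int)) := by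
  induction vs with
  | nil => intro c _; simp
  | cons v t ih =>
    intro c hb
    obtain ⟨hv0, hvlt⟩ := hb v (List.mem_cons_self ..)
    have hstep : bumpAt c v = c.set v.toNat (PySem.List.pyGetD c v 0 + 1) := by
      rw [bumpAt, PySem.List.pySetD_of_nonneg _ _ hv0]
    have hlen' : (bumpAt c v).length = c.length := by rw [hstep, List.length_set]
    have hb' : ∀ w ∈ t, 0 ≤ w ∧ w < ((bumpAt c v).length : Int) := by
      intro w hw; rw [hlen']; exact hb w (List.mem_cons_of_mem _ hw)
    obtain ⟨ihlen, ihget⟩ := ih (bumpAt c v) hb'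
    rw [List.foldl_cons]
    refine ⟨by rw [ihlen, hlen'], ?_⟩
    intro j
    rw [ihget j, hstep]
    have hvnat : v.toNat < c.length := by omega
    have hget : PySem.List.pyGetD c v 0 = c.getD v.toNat 0 := by
      rw [PySem.List.pyGetD_eq_getElem c 0 hv0 hvlt, List.getD_eq_getElem _ _ hvnat]
    by_cases hj : j = v.toNat
    · subst hj
      rw [List.getD_eq_getElem _ _ (by rwa [List.length_set]), List.getElem_set_self,
        List.count_cons, hget, List.getD_eq_getElem _ _ hvnat]
      simp [Int.toNat_of_nonneg hv0]
      omega
    · have hvne : v ≠ ((j : Nat) : Int) := by omega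
      rw [List.count_cons]
      simp only [hvne, beq_iff_eq, if_false]
      rcases Nat.lt_or_ge j c.length with hjlt | hjge
      · rw [List.getD_eq_getElem _ _ (by rwa [List.length_set]),
          List.getElem_set_ne (by omega), List.getD_eq_getElem _ _ hjlt]
        simp
      · rw [List.getD_eq_default _ _ (by simpa [List.length_set] using hjge),
          List.getD_eq_default _ _ (by simpa using hjge)]
        simp

-- the threshold scan finds the two middle order statistics of T
theorem scan_inv (T : List Int) (hs : T.Pairwise (· ≤ ·)) (hpos : ∀ x ∈ T, 0 ≤ x)
    (k : Nat) (hk : 1 ≤ k) (hlen : T.length = 2 * k)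
    (cnt : List Int)
    (hc : ∀ j : Nat, PySem.List.pyGetD cnt ((j : Nat) : Int) 0 = (T.count ((j : Nat) : Int) : Int)) :
    ∀ b : Nat,
    (PySem.List.pyRange 0 ((b : Nat) : Int) 1).foldl (scanStep ((k : Nat) : Int) cnt) (0, none, none) =
    (((T.countP (fun x => decide (x < ((b : Nat) : Int))) : Nat) : Int),
     (if k ≤ T.countP (fun x => decide (x < ((b : Nat) : Int))) then some (T.getD (k-1) 0) else none),
     (if k + 1 ≤ T.countP (fun x => decide (x < ((b : Nat) : Int))) then some (T.getD k 0) else none)) := by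
  intro b
  induction b with
  | zero =>
    have h0 : T.countP (fun x => decide (x < ((0:Nat):Int))) = 0 := by
      rw [List.countP_eq_zero]
      intro a ha
      have := hpos a ha
      simp only [Nat.cast_zero, decide_eq_true_eq, not_lt]
      exact this
    rw [h0]
    rw [show ((0:Nat):Int) = 0 by norm_num, PySem.List.pyRange_one_eq_nil (le_refl 0)]
    simp only [List.foldl_nil]
    rw [if_neg (by omega), if_neg (by omega)]
  | succ b ih =>
    have hcast : ((b+1 : Nat) : Int) = ((b:Nat):Int) + 1 := by push_cast; ring
    have hsplitc : T.countP (fun x => decide (x < ((b:Nat):Int) + 1)) =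
        T.countP (fun x => decide (x < ((b:Nat):Int))) + T.count ((b:Nat):Int) :=
      countP_lt_succ T _
    set cb := T.countP (fun x => decide (x < ((b:Nat):Int))) with hcb
    have hrange : PySem.List.pyRange 0 (((b+1:Nat)):Int) 1 =
        PySem.List.pyRange 0 ((b:Nat):Int) 1 ++ [((b:Nat):Int)] := by
      rw [hcast]; exact PySem.List.pyRange_one_succ_right (by positivity)
    rw [hrange, List.foldl_append, ih, List.foldl_cons, List.foldl_nil]
    have htot : (((cb:Nat):Int) + PySem.List.pyGetD cnt ((b:Nat):Int) 0) =
        ((T.countP (fun x => decide (x < ((b+1:Nat):Int))) : Nat) : Int) := by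
      rw [hc b, hcast, hsplitc]; push_cast; ring
    have hk1len : k - 1 < T.length := by omega
    have hklen : k < T.length := by omega
    have hgetD1 : T.getD (k-1) 0 = T[k-1]'hk1len := List.getD_eq_getElem _ _ hk1len
    have hgetD2 : T.getD k 0 = T[k]'hklen := List.getD_eq_getElem _ _ hklen
    simp only [scanStep]
    refine Prod.ext ?_ (Prod.ext ?_ ?_)
    · simpa using htot
    · -- lo component
      simp only
      by_cases h1 : k ≤ cb
      · rw [if_pos h1]
        rw [if_neg (by simp)]
        rw [if_pos (by rw [hcast, hsplitc]; omega)]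
      · rw [if_neg h1]
        by_cases h2 : k ≤ T.countP (fun x => decide (x < ((b+1:Nat):Int)))
        · rw [if_pos (by constructor; rfl; rw [htot]; exact_mod_cast h2), if_pos h2]
          have hlt : T[k-1]'hk1len < ((b:Nat):Int) + 1 := by
            rw [← select_iff T hs (k-1) hk1len]
            rw [hcast] at h2; rw [hsplitc] at h2 ⊢
            omega
          have hge : ((b:Nat):Int) ≤ T[k-1]'hk1len := by
            by_contra hcon
            rw [not_le] at hcon
            rw [← select_iff T hs (k-1) hk1len] at hcon
            omega
          rw [hgetD1]
          congr 1
          omega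
        · rw [if_neg (by rintro ⟨-, hle⟩; rw [htot] at hle; exact h2 (by exact_mod_cast hle)),
            if_neg h2]
    · -- hi component
      simp only
      by_cases h1 : k + 1 ≤ cb
      · rw [if_pos h1]
        rw [if_neg (by simp)]
        rw [if_pos (by rw [hcast, hsplitc]; omega)]
      · rw [if_neg h1]
        by_cases h2 : k + 1 ≤ T.countP (fun x => decide (x < ((b+1:Nat):Int)))
        · rw [if_pos (by constructor; rfl; rw [htot]; exact_mod_cast h2), if_pos h2]
          have hlt : T[k]'hklen < ((b:Nat):Int) + 1 := by
            rw [← select_iff T hs k hklen]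
            rw [hcast] at h2; rw [hsplitc] at h2 ⊢
            omega
          have hge : ((b:Nat):Int) ≤ T[k]'hklen := by
            by_contra hcon
            rw [not_le] at hcon
            rw [← select_iff T hs k hklen] at hcon
            omega
          rw [hgetD2]
          congr 1
          omega
        · rw [if_neg (by rintro ⟨-, hle⟩; rw [htot] at hle; exact h2 (by exact_mod_cast hle)),
            if_neg h2]

-- ===== VERDICT (by name: the statement is the Claim_ definition above) =====
theorem solution_spec : Claim_equal_solution := by
  intro s _ hpre
  unfold Spec_solution
  have hne : s.toList ≠ [] := by
    intro h
    exact hpre (String.toList_eq_nil_iff.mp h)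
  simp only [solution, solution_alt, PySem.Str.len_eq]
  set n := s.toList.length with hn
  have hn1 : 1 ≤ n := by
    cases hcs : s.toList with
    | nil => exact absurd hcs hne
    | cons a t => rw [hn, hcs]; simp
  by_cases h1 : ((n:Nat):Int) = 1
  · rw [if_pos h1, if_pos h1]
  rw [if_neg h1, if_neg h1]
  by_cases h2 : ((n:Nat):Int) = 2
  · rw [if_pos h2, if_pos h2]
  rw [if_neg h2, if_neg h2]
  have hstepEq : dictStepB = dictStep := rfl
  rw [hstepEq]
  -- dictionary invariants
  obtain ⟨hkeq, hv1, hv2, hkmem⟩ :=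
    dict_fold_inv (PySem.List.enumerate s.toList 0) PySem.Dict.empty PySem.Dict.empty rfl
  set fl := (PySem.List.enumerate s.toList 0).foldl dictStep (PySem.Dict.empty, PySem.Dict.empty)
    with hfl
  set F := fl.1.values with hF
  set L := fl.2.values with hL
  set k := fl.1.keys.length with hkdef
  have hFlen : F.length = k := by simp [hF, hkdef, PySem.Dict.values, PySem.Dict.keys]
  have hLlen : L.length = k := by
    rw [hL, hkdef, hkeq]; simp [PySem.Dict.values, PySem.Dict.keys]
  have hsize : fl.1.size = k := by simp [hkdef, PySem.Dict.size, PySem.Dict.keys]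
  have hboundF : ∀ v ∈ F, 0 ≤ v ∧ v < (n:Int) := by
    intro v hv
    rcases hv1 v hv with h | h
    · simp [PySem.Dict.values, PySem.Dict.empty] at h
    · rw [PySem.List.map_fst_enumerate] at h
      have := PySem.List.mem_pyRange_one.mp h
      constructor <;> omega
  have hboundL : ∀ v ∈ L, 0 ≤ v ∧ v < (n:Int) := by
    intro v hv
    rcases hv2 v hv with h | h
    · simp [PySem.Dict.values, PySem.Dict.empty] at h
    · rw [PySem.List.map_fst_enumerate] at h
      have := PySem.List.mem_pyRange_one.mp h
      constructor <;> omega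
  have hkpos : 1 ≤ k := by
    have hmem : s.toList.head hne ∈ fl.1.keys := by
      rw [hkmem]
      right
      rw [PySem.List.map_snd_enumerate]
      exact List.head_mem hne
    rw [hkdef]
    exact List.length_pos_of_mem hmem
  -- the sorted multiset of indices
  set M := F ++ L with hM
  have hMlen : M.length = 2 * k := by rw [hM, List.length_append, hFlen, hLlen]; ring
  set T := PySem.List.sorted M (fun x => x) false with hT
  have hTlen : T.length = 2 * k := by rw [hT, PySem.List.length_sorted, hMlen]
  have hTs : T.Pairwise (· ≤ ·) := by
    have := PySem.List.sorted_pairwise M (fun x => x)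
    simpa using this
  have hTbound : ∀ x ∈ T, 0 ≤ x ∧ x < (n:Int) := by
    intro x hx
    rw [hT, PySem.List.mem_sorted, hM, List.mem_append] at hx
    rcases hx with h | h
    · exact hboundF x h
    · exact hboundL x h
  have hTcount : ∀ j : Int, T.count j = M.count j := fun j =>
    (PySem.List.sorted_perm M (fun x => x) false).count_eq j
  have hk1len : k - 1 < T.length := by omega
  have hklen : k < T.length := by omega
  -- A's side: the two middle entries of the sorted list
  have hmid : PySem.Int.floordiv ((T.length : Nat) : Int) 2 = ((k:Nat):Int) := by
    rw [PySem.Int.floordiv_eq_ediv_of_pos (by norm_num), hTlen]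
    omega
  have hgetk : PySem.List.pyGet? T ((k:Nat):Int) = some (T[k]'hklen) := by
    rw [PySem.List.pyGet?_natCast, List.getElem?_eq_getElem hklen]
  have hgetk1 : PySem.List.pyGet? T (((k:Nat):Int) - 1) = some (T[k-1]'hk1len) := by
    have : ((k:Nat):Int) - 1 = ((k-1 : Nat) : Int) := by omega
    rw [this, PySem.List.pyGet?_natCast, List.getElem?_eq_getElem hk1len]
  rw [hmid, hgetk, hgetk1]
  -- B's side: counting array
  have hrep : ((n:Nat):Int).toNat = n := by omega
  rw [hrep]
  obtain ⟨hlen1, hget1⟩ := bump_fold F (List.replicate n 0)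
    (by intro v hv; simpa using hboundF v hv)
  set cnt1 := F.foldl bumpAt (List.replicate n 0) with hcnt1
  obtain ⟨hlen2, hget2⟩ := bump_fold L cnt1
    (by intro v hv; rw [hlen1]; simpa using hboundL v hv)
  set cnt := L.foldl bumpAt cnt1 with hcnt
  have hc : ∀ j : Nat, PySem.List.pyGetD cnt ((j : Nat) : Int) 0 = (T.count ((j : Nat) : Int) : Int) := by
    intro j
    rw [PySem.List.pyGetD_natCast, hget2 j, hget1 j, hTcount, hM, List.count_append]
    have hrepget : (List.replicate n (0:Int)).getD j 0 = 0 := by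
      rcases Nat.lt_or_ge j n with hj | hj
      · rw [List.getD_eq_getElem _ _ (by simpa using hj)]; simp
      · rw [List.getD_eq_default _ _ (by simpa using hj)]
    rw [hrepget]
    push_cast
    ring
  have hscan := scan_inv T hTs (fun x hx => (hTbound x hx).1) k hkpos hTlen cnt hc n
  rw [hsize, hscan]
  have hall : T.countP (fun x => decide (x < ((n:Nat):Int))) = T.length := by
    rw [List.countP_eq_length]
    intro a ha
    simpa using (hTbound a ha).2
  rw [hall, hTlen, if_pos (by omega), if_pos (by omega)]
  simp only
  rw [List.getD_eq_getElem _ _ hk1len, List.getD_eq_getElem _ _ hklen]
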